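-- pv_equiv track=rewrite | github.com/x3ng/codes | python/questions/longestBalanced.py | longestBalanced
-- ===== SOURCE A (Python) =====
-- from typing import List
--
-- def longestBalanced(nums: List[int]) -> int:
--     ans = 0
--     n = len(nums)
--     for s in range(n):
--         nst = set([nums[s]])
--         d = 1 if nums[s] & 1 else -1
--         for e in range(s+1, n):
--             cn = nums[e]
--             if cn not in nst:
--                 nst.add(cn)
--                 d += 1 if cn & 1 else -1
--             if d == 0:
--                 ans = max(ans, e-s+1)
--     return ans
-- ===== SOURCE B (Python) =====
-- from typing import List
--
-- def longestBalanced(nums: List[int]) -> int: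
--     # Sweep the right endpoint e once, maintaining D[s] = balance of window nums[s..e]
--     # (distinct odds minus distinct evens) for every start s via a range update:
--     # nums[e] contributes to exactly the starts s > (last previous index of nums[e]).
--     # The best window ending at e is the earliest start with zero balance.
--     last = {}
--     D = []
--     ans = 0
--     for e, v in enumerate(nums):
--         p = last.get(v, -1)
--         last[v] = e
--         D.append(0)
--         sign = 1 if v & 1 else -1
--         for s in range(p + 1, e + 1):
--             D[s] += sign
--         for s in range(e + 1):
--             if D[s] == 0:
--                 ans = max(ans, e - s + 1)
--                 break
--     return ans
-- ===== Notes on version B (the rewrite author's own statement) =====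
-- stated objective: alternative
-- what changed: B abandons A's per-start rescan (a fresh set and balance per start) for a single sweep over the right endpoint: it maintains one array D with the balance of every window ending at the current element, updated by a range-add over exactly the starts where the element is newly seen, and takes the earliest zero-balance start per endpoint.
import Mathlib
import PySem

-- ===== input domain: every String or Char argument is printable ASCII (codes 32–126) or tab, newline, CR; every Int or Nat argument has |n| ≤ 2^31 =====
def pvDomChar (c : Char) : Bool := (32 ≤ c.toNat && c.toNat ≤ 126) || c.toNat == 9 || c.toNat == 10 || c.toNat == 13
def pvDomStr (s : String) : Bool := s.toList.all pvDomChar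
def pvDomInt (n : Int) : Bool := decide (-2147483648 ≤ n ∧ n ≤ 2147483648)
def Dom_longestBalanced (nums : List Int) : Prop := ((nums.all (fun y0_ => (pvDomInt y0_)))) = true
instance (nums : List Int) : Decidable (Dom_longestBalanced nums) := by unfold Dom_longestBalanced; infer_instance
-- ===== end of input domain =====

-- B replaces A's per-start window scan (a fresh set per start, quadratic in restarts)
-- with a single sweep over the right endpoint maintaining one balance-per-start array
-- via range updates; objective: a different algorithm of similar cost.

-- ===== PORT A =====
-- the ±1 contribution '1 if x & 1 else -1' (A's code; B's Source B repeats the same expression)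
def lbOdd (x : Int) : Int := if PySem.Int.band x 1 ≠ 0 then 1 else -1

def lbAStep (nums : List Int) (s : Int) (st : PySem.Set Int × Int × Int) (e : Int) :
    PySem.Set Int × Int × Int :=
  let cn := PySem.List.pyGetD nums e 0
  let st1 := if cn ∈ st.1 then st else (PySem.Set.add st.1 cn, st.2.1 + lbOdd cn, st.2.2)
  if st1.2.1 = 0 then (st1.1, st1.2.1, max st1.2.2 (e - s + 1)) else st1

def longestBalanced (nums : List Int) : Int :=
  let n := PySem.List.len nums
  (PySem.List.pyRange 0 n 1).foldl (fun ans s =>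
    let x := PySem.List.pyGetD nums s 0
    ((PySem.List.pyRange (s + 1) n 1).foldl (lbAStep nums s)
      (PySem.Set.ofList [x], lbOdd x, ans)).2.2) 0

-- ===== PORT B =====
-- 'D[s] += sign' for one s
def lbUpd (sign : Int) (D : List Int) (s : Int) : List Int :=
  PySem.List.pySetD D s (PySem.List.pyGetD D s 0 + sign)

-- 'for s in range(e+1): if D[s] == 0: ans = max(ans, e-s+1); break'
def lbScan (D : List Int) (e ans : Int) : List Int → Int
  | [] => ans
  | s :: rest =>
      if PySem.List.pyGetD D s 0 = 0 then max ans (e - s + 1) else lbScan D e ans rest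

-- one iteration of B's outer loop: state (last, D, ans), element (e, v)
def lbBStep (st : PySem.Dict Int Int × List Int × Int) (ev : Int × Int) :
    PySem.Dict Int Int × List Int × Int :=
  let e := ev.1
  let v := ev.2
  let p := st.1.getD v (-1)
  let last := st.1.insert v e
  let sign := lbOdd v
  let D := (PySem.List.pyRange (p + 1) (e + 1) 1).foldl (lbUpd sign) (st.2.1 ++ [0])
  let ans := lbScan D e st.2.2 (PySem.List.pyRange 0 (e + 1) 1)
  (last, D, ans)

def longestBalanced_alt (nums : List Int) : Int :=
  ((PySem.List.enumerate nums 0).foldl lbBStep (PySem.Dict.empty, [], 0)).2.2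

-- ===== PRECONDITION & SPEC =====
def Spec_longestBalanced (nums : List Int) (out : Int) : Prop := out = longestBalanced_alt nums
instance (nums : List Int) (out : Int) : Decidable (Spec_longestBalanced nums out) := by unfold Spec_longestBalanced; infer_instance

-- ===== CLAIM (what is proved, stated in full; the proofs are below) =====
def Claim_equal_longestBalanced : Prop := ∀ (nums : List Int), Dom_longestBalanced nums → Spec_longestBalanced nums (longestBalanced nums)

-- ===== LEMMAS AND PROOFS =====

-- the window nums[s..e] (inclusive), and its balance: distinct odds minus distinct evens
def lbWin (nums : List Int) (s e : Nat) : List Int := (nums.take (e + 1)).drop s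

def lbBal (w : List Int) : Int := ((PySem.Set.ofList w).map lbOdd).sum

theorem lbOdd_ne_zero (v : Int) : lbOdd v ≠ 0 := by
  unfold lbOdd; split <;> decide

theorem lbBal_snoc (w : List Int) (v : Int) :
    lbBal (w ++ [v]) = lbBal w + (if v ∈ w then 0 else lbOdd v) := by
  unfold lbBal
  rw [show PySem.Set.ofList (w ++ [v]) = PySem.Set.add (PySem.Set.ofList w) v by
    simp [PySem.Set.ofList_eq_foldl, List.foldl_append]]
  by_cases h : v ∈ w
  · simp [PySem.Set.add, PySem.Set.contains, PySem.Set.mem_ofList, h]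
  · simp [PySem.Set.add, PySem.Set.contains, PySem.Set.mem_ofList, h]

-- the window nums[s:k] grows by nums[k] on the right
theorem lbWin_succ (nums : List Int) (s k : Nat) (hs : s ≤ k) (hk : k < nums.length) :
    (nums.take (k + 1)).drop s = (nums.take k).drop s ++ [nums.getD k 0] := by
  rw [List.take_add_one, List.getElem?_eq_getElem hk]
  rw [List.drop_append_of_le_length (by simp [List.length_take]; omega)]
  simp [List.getD_eq_getElem?_getD, List.getElem?_eq_getElem hk]

theorem lbBal_singleton (v : Int) : lbBal [v] = lbOdd v := by
  simp [lbBal, PySem.Set.ofList]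

-- generic fold-max facts -------------------------------------------------

theorem foldl_keep {β : Type} {g : Int → β → Int} (h : ∀ a x, a ≤ g a x) :
    ∀ (l : List β) (a : Int), a ≤ l.foldl g a := by
  intro l
  induction l with
  | nil => intro a; simp
  | cons x xs ih => intro a; exact le_trans (h a x) (ih (g a x))

theorem foldl_ge {β : Type} {g : Int → β → Int} (h : ∀ a x, a ≤ g a x)
    {x : β} {l : List β} (hx : x ∈ l) {v : Int} (hv : ∀ a, v ≤ g a x) (a : Int) :
    v ≤ l.foldl g a := by
  obtain ⟨l1, l2, rfl⟩ := List.append_of_mem hx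
  rw [List.foldl_append, List.foldl_cons]
  exact le_trans (hv _) (foldl_keep h l2 _)

theorem foldl_reach {β : Type} {g : Int → β → Int} {R : Int → Prop} :
    ∀ (l : List β), (∀ a, ∀ x ∈ l, g a x = a ∨ R (g a x)) →
    ∀ a, l.foldl g a = a ∨ R (l.foldl g a) := by
  intro l
  induction l with
  | nil => intro _ a; left; rfl
  | cons x xs ih =>
      intro h a
      rw [List.foldl_cons]
      rcases ih (fun a y hy => h a y (List.mem_cons_of_mem _ hy)) (g a x) with h1 | h1
      · rw [h1]
        rcases h a x (List.mem_cons_self) with h2 | h2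
        · left; exact h2
        · right; exact h2
      · right; exact h1

-- the pairs both programs maximise over ---------------------------------

def lbP (nums : List Int) (s e : Int) : Prop :=
  0 ≤ s ∧ s ≤ e ∧ e < PySem.List.len nums ∧ lbBal (lbWin nums s.toNat e.toNat) = 0

def lbR (nums : List Int) (v : Int) : Prop := ∃ s e, lbP nums s e ∧ v = e - s + 1

-- abstract forms of the two programs -------------------------------------

def lbStepAbs (nums : List Int) (s : Int) (a : Int) (e : Int) : Int :=
  if lbBal (lbWin nums s.toNat e.toNat) = 0 then max a (e - s + 1) else a

def lbAbsA (nums : List Int) : Int :=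
  (PySem.List.pyRange 0 (PySem.List.len nums) 1).foldl (fun ans s =>
    (PySem.List.pyRange (s + 1) (PySem.List.len nums) 1).foldl
      (fun a e => lbStepAbs nums s a e) ans) 0

def lbAbsB (nums : List Int) : Int :=
  (PySem.List.pyRange 0 (PySem.List.len nums) 1).foldl (fun ans e =>
    (PySem.List.pyRange 0 (e + 1) 1).foldl (fun a s => lbStepAbs nums s a e) ans) 0

theorem lbStepAbs_mono (nums : List Int) (s : Int) : ∀ a e, a ≤ lbStepAbs nums s a e := by
  intro a e; unfold lbStepAbs; split <;> simp

-- A = absA ---------------------------------------------------------------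

theorem innerA_eq (nums : List Int) (s : Nat) :
    ∀ (m k : Nat), nums.length - k ≤ m → s ≤ k →
    ∀ (nst : PySem.Set Int) (d ans : Int),
    (∀ x, x ∈ nst ↔ x ∈ (nums.take k).drop s) → d = lbBal ((nums.take k).drop s) →
    ((PySem.List.pyRange (k : Int) (nums.length : Int) 1).foldl (lbAStep nums (s : Int))
        (nst, d, ans)).2.2
      = (PySem.List.pyRange (k : Int) (nums.length : Int) 1).foldl
          (fun a e => lbStepAbs nums (s : Int) a e) ans := by
  intro m
  induction m with
  | zero =>
      intro k hm _ nst d ans _ _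
      rw [PySem.List.pyRange_one_eq_nil (by exact_mod_cast Nat.le_of_sub_eq_zero (by omega))]
      rfl
  | succ m ih =>
      intro k hm hs nst d ans hmem hd
      by_cases hk : k < nums.length
      · rw [PySem.List.pyRange_one_cons (by exact_mod_cast hk), List.foldl_cons, List.foldl_cons]
        have hcast : ((k : Int) + 1) = (((k + 1 : Nat) : Nat) : Int) := by push_cast; ring
        have hget : PySem.List.pyGetD nums (k : Int) 0 = nums.getD k 0 := by simp
        have hwin : lbWin nums ((s : Int)).toNat ((k : Int)).toNat = (nums.take (k + 1)).drop s := by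
          simp [lbWin]
        have hbal : lbBal ((nums.take (k + 1)).drop s)
            = d + (if nums.getD k 0 ∈ (nums.take k).drop s then 0 else lbOdd (nums.getD k 0)) := by
          rw [lbWin_succ nums s k hs hk, lbBal_snoc, hd]
        by_cases hc : nums.getD k 0 ∈ (nums.take k).drop s
        · have hA : nums.getD k 0 ∈ nst := (hmem _).mpr hc
          have hb : lbBal ((nums.take (k + 1)).drop s) = d := by rw [hbal, if_pos hc]; ring
          have stepA : lbAStep nums (s : Int) (nst, d, ans) (k : Int)
              = (nst, d, if d = 0 then max ans ((k : Int) - s + 1) else ans) := by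
            simp only [lbAStep, hget]
            rw [if_pos hA]
            by_cases hd0 : d = 0
            · simp only [if_pos hd0]
            · simp only [if_neg hd0]
          have stepAbs : lbStepAbs nums (s : Int) ans (k : Int)
              = if d = 0 then max ans ((k : Int) - s + 1) else ans := by
            unfold lbStepAbs; rw [hwin, hb]
          rw [stepA, stepAbs, hcast]
          exact ih (k + 1) (by omega) (by omega) nst d _ (by
            intro x
            rw [lbWin_succ nums s k hs hk]
            simp only [List.mem_append, List.mem_singleton, hmem]
            constructor
            · exact Or.inl
            · rintro (h | rfl)
              · exact h
              · exact hc) (by rw [hb])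
        · have hA : nums.getD k 0 ∉ nst := fun h => hc ((hmem _).mp h)
          have hb : lbBal ((nums.take (k + 1)).drop s) = d + lbOdd (nums.getD k 0) := by
            rw [hbal, if_neg hc]
          have stepA : lbAStep nums (s : Int) (nst, d, ans) (k : Int)
              = (PySem.Set.add nst (nums.getD k 0), d + lbOdd (nums.getD k 0),
                 if d + lbOdd (nums.getD k 0) = 0 then max ans ((k : Int) - s + 1) else ans) := by
            simp only [lbAStep, hget]
            rw [if_neg hA]
            by_cases hd0 : d + lbOdd (nums.getD k 0) = 0
            · simp only [if_pos hd0]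
            · simp only [if_neg hd0]
          have stepAbs : lbStepAbs nums (s : Int) ans (k : Int)
              = if d + lbOdd (nums.getD k 0) = 0 then max ans ((k : Int) - s + 1) else ans := by
            unfold lbStepAbs; rw [hwin, hb]
          rw [stepA, stepAbs, hcast]
          exact ih (k + 1) (by omega) (by omega) _ _ _ (by
            intro x
            rw [lbWin_succ nums s k hs hk, PySem.Set.mem_add]
            simp [hmem]) (by rw [hb])
      · rw [PySem.List.pyRange_one_eq_nil (by exact_mod_cast Nat.le_of_not_lt hk)]
        rfl

theorem A_eq_absA (nums : List Int) : longestBalanced nums = lbAbsA nums := by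
  unfold longestBalanced lbAbsA
  simp only [PySem.List.len_eq, PySem.List.pyRange_zero_nat, List.foldl_map]
  apply PySem.List.foldl_congr_mem
  intro ans s hsmem
  have hs : s < nums.length := List.mem_range.mp hsmem
  have h1 : ((s : Int) + 1) = (((s + 1 : Nat) : Nat) : Int) := by push_cast; ring
  have hwin1 : (nums.take (s + 1)).drop s = [nums.getD s 0] := by
    rw [lbWin_succ nums s s le_rfl hs]
    have : (nums.take s).drop s = [] := List.drop_eq_nil_of_le (by simp)
    rw [this, List.nil_append]
  have hget : PySem.List.pyGetD nums (s : Int) 0 = nums.getD s 0 := by simp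
  rw [h1]
  rw [innerA_eq nums s (nums.length - (s + 1)) (s + 1) le_rfl (by omega)
    _ _ ans
    (by intro x; rw [hwin1]; simp [PySem.Set.mem_ofList, hget])
    (by rw [hwin1, lbBal_singleton, hget])]

-- B = absB ---------------------------------------------------------------

-- index of the LAST occurrence of v in xs, -1 if none (the value B's dict holds)
def lastIdx : List Int → Int → Int
  | [], _ => -1
  | x :: xs, v =>
      if 0 ≤ lastIdx xs v then lastIdx xs v + 1 else if x = v then 0 else -1

theorem lastIdx_nonneg_iff (xs : List Int) (v : Int) : 0 ≤ lastIdx xs v ↔ v ∈ xs := by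
  induction xs with
  | nil => simp [lastIdx]
  | cons x xs ih =>
      by_cases h : 0 ≤ lastIdx xs v
      · simp [lastIdx, h, ih.mp h]
        omega
      · by_cases hx : x = v <;> simp [lastIdx, h, hx, ← ih] <;> try omega

theorem lastIdx_lt_length (xs : List Int) (v : Int) : lastIdx xs v < xs.length := by
  induction xs with
  | nil => simp [lastIdx]
  | cons x xs ih =>
      by_cases h : 0 ≤ lastIdx xs v
      · simp only [lastIdx, if_pos h, List.length_cons]; push_cast; omega
      · by_cases hx : x = v <;> simp only [lastIdx, if_neg h, if_pos, hx, List.length_cons]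
          <;> simp <;> omega

theorem neg_one_le_lastIdx (xs : List Int) (v : Int) : -1 ≤ lastIdx xs v := by
  induction xs with
  | nil => simp [lastIdx]
  | cons x xs ih => unfold lastIdx; split_ifs <;> omega

theorem lastIdx_snoc (pre : List Int) (x v : Int) :
    lastIdx (pre ++ [x]) v = if v = x then (pre.length : Int) else lastIdx pre v := by
  induction pre with
  | nil =>
      by_cases h : v = x
      · subst h; simp [lastIdx]
      · simp [lastIdx, h, Ne.symm h]
  | cons y pre ih =>
      by_cases h : v = x
      · have h1 : lastIdx (pre ++ [x]) v = (pre.length : Int) := by rw [ih, if_pos h]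
        have h0 : (0 : Int) ≤ (pre.length : Int) := Int.natCast_nonneg _
        simp only [List.cons_append, lastIdx, h1, if_pos h0, if_pos h, List.length_cons]
        push_cast; ring
      · have h1 : lastIdx (pre ++ [x]) v = lastIdx pre v := by rw [ih, if_neg h]
        simp only [List.cons_append, lastIdx, h1, if_neg h]

theorem lastIdx_lt_iff (pre : List Int) (v : Int) (s : Nat) :
    lastIdx pre v < (s : Int) ↔ v ∉ pre.drop s := by
  induction pre generalizing s with
  | nil => simp [lastIdx]; omega
  | cons x xs ih =>
      cases s with
      | zero =>
          have := lastIdx_nonneg_iff (x :: xs) v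
          simp only [List.drop_zero, Nat.cast_zero]
          constructor
          · intro h hm; have := this.mpr hm; omega
          · intro hm; by_contra h; exact hm (this.mp (by omega))
      | succ t =>
          by_cases h : 0 ≤ lastIdx xs v
          · have : lastIdx (x :: xs) v = lastIdx xs v + 1 := by simp [lastIdx, h]
            rw [this, List.drop_succ_cons, ← ih]
            push_cast; omega
          · have hm : v ∉ xs := fun hv => h ((lastIdx_nonneg_iff xs v).mpr hv)
            have hlt : lastIdx (x :: xs) v < ((t + 1 : Nat) : Int) := by
              by_cases hx : x = v <;> simp [lastIdx, h, hx] <;> try omega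
            simp only [hlt, List.drop_succ_cons, true_iff]
            exact fun hv => hm (List.mem_of_mem_drop hv)

-- the range-update loop, pointwise
theorem lbUpd_fold_length (sign : Int) :
    ∀ (r : List Int) (L : List Int), ((r.foldl (lbUpd sign) L)).length = L.length := by
  intro r
  induction r with
  | nil => intro L; rfl
  | cons x xs ih =>
      intro L
      rw [List.foldl_cons, ih]
      unfold lbUpd
      exact PySem.List.length_pySetD _ _ _

-- getD after set, in the range
theorem getD_set_eq (L : List Int) (i : Nat) (v : Int) (h : i < L.length) (s : Nat) :
    (L.set i v).getD s 0 = if s = i then v else L.getD s 0 := by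
  by_cases hs : s = i
  · subst hs; simp [List.getD_eq_getElem?_getD, h]
  · rw [if_neg hs]
    simp only [List.getD_eq_getElem?_getD, List.getElem?_set]
    rw [if_neg (fun h2 => hs h2.symm)]

theorem lbUpd_fold_getD (sign : Int) :
    ∀ (m : Nat) (a b : Int) (L : List Int) (s : Nat), 0 ≤ a → (b - a).toNat ≤ m →
    b ≤ (L.length : Int) →
    PySem.List.pyGetD ((PySem.List.pyRange a b 1).foldl (lbUpd sign) L) (s : Int) 0
      = PySem.List.pyGetD L (s : Int) 0 + (if a ≤ (s : Int) ∧ (s : Int) < b then sign else 0) := by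
  intro m
  induction m with
  | zero =>
      intro a b L s ha hm _
      rw [PySem.List.pyRange_one_eq_nil (by omega)]
      rw [if_neg (by omega)]
      simp
  | succ m ih =>
      intro a b L s ha hm hbL
      by_cases hab : a < b
      · rw [PySem.List.pyRange_one_cons hab, List.foldl_cons]
        have ha' : a = ((a.toNat : Nat) : Int) := by omega
        have haN : a.toNat < L.length := by omega
        have hL' : (lbUpd sign L a).length = L.length := PySem.List.length_pySetD _ _ _
        have hset : ∀ t : Nat, PySem.List.pyGetD (lbUpd sign L a) (t : Int) 0
            = if t = a.toNat then L.getD a.toNat 0 + sign else L.getD t 0 := by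
          intro t
          unfold lbUpd
          rw [ha', PySem.List.pySetD_natCast, PySem.List.pyGetD_natCast,
            PySem.List.pyGetD_natCast]
          exact getD_set_eq L a.toNat _ haN t
        rw [ih (a + 1) b _ s (by omega) (by omega) (by rw [hL']; exact hbL), hset s]
        rw [PySem.List.pyGetD_natCast]
        by_cases hsa : s = a.toNat
        · subst hsa
          rw [if_pos rfl]
          split_ifs <;> omega
        · rw [if_neg hsa]
          split_ifs <;> omega
      · rw [PySem.List.pyRange_one_eq_nil (by omega), if_neg (by omega)]
        simp

-- the break-scan equals the full fold (later starts give shorter windows)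
theorem lbScan_stay (e : Int) :
    ∀ (l : List Int) (a : Int) (g : Int → Int), (∀ s ∈ l, e - s + 1 ≤ a) →
    l.foldl (fun a s => if g s = 0 then max a (e - s + 1) else a) a = a := by
  intro l
  induction l with
  | nil => intro a g _; rfl
  | cons x xs ih =>
      intro a g h
      rw [List.foldl_cons]
      have hx : e - x + 1 ≤ a := h x (List.mem_cons_self)
      have : (if g x = 0 then max a (e - x + 1) else a) = a := by
        split
        · omega
        · rfl
      rw [this]
      exact ih a g (fun s hs => h s (List.mem_cons_of_mem _ hs))

theorem lbScan_eq (D : List Int) (e ans : Int) :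
    ∀ (l : List Int), l.Pairwise (· < ·) →
    lbScan D e ans l
      = l.foldl (fun a s => if PySem.List.pyGetD D s 0 = 0 then max a (e - s + 1) else a) ans := by
  intro l
  induction l with
  | nil => intro _; rfl
  | cons x xs ih =>
      intro hp
      rw [List.foldl_cons]
      unfold lbScan
      by_cases h : PySem.List.pyGetD D x 0 = 0
      · rw [if_pos h, if_pos h]
        rw [lbScan_stay e xs (max ans (e - x + 1)) _ (fun s hs => by
          have := (List.pairwise_cons.mp hp).1 s hs
          omega)]
      · rw [if_neg h, if_neg h]
        exact ih (List.pairwise_cons.mp hp).2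

theorem take_len_succ (pre : List Int) (v : Int) (rest : List Int) :
    (pre ++ v :: rest).take (pre.length + 1) = pre ++ [v] := by
  induction pre with
  | nil => simp
  | cons x xs ih => simp only [List.cons_append, List.length_cons, List.take_succ_cons, ih]

-- B's outer loop against the abstract per-endpoint fold
theorem B_aux (nums : List Int) :
    ∀ (rest pre : List Int), nums = pre ++ rest →
    ∀ (dict : PySem.Dict Int Int) (D : List Int) (ans : Int),
    (∀ v, dict.getD v (-1) = lastIdx pre v) →
    D = (List.range pre.length).map (fun s => lbBal (pre.drop s)) →
    ((PySem.List.enumerate rest (pre.length : Int)).foldl lbBStep (dict, D, ans)).2.2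
      = (PySem.List.pyRange (pre.length : Int) (PySem.List.len nums) 1).foldl
          (fun a e => (PySem.List.pyRange 0 (e + 1) 1).foldl
            (fun a s => lbStepAbs nums s a e) a) ans := by
  intro rest
  induction rest with
  | nil =>
      intro pre hn dict D ans _ _
      rw [PySem.List.enumerate_nil, List.foldl_nil,
        PySem.List.pyRange_one_eq_nil (by simp [hn, PySem.List.len_eq])]
      rfl
  | cons v rest ih =>
      intro pre hn dict D ans hdict hD
      have hlen : nums.length = pre.length + 1 + rest.length := by
        rw [hn]; simp; omega
      have htake : nums.take (pre.length + 1) = pre ++ [v] := by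
        rw [hn]; exact take_len_succ pre v rest
      have hdrop : ∀ s : Nat, s ≤ pre.length →
          (pre ++ [v]).drop s = pre.drop s ++ [v] :=
        fun s hs => List.drop_append_of_le_length hs
      have hp1 : -1 ≤ lastIdx pre v := neg_one_le_lastIdx pre v
      have hp2 : lastIdx pre v < (pre.length : Int) := lastIdx_lt_length pre v
      have hDlen : D.length = pre.length := by rw [hD]; simp
      -- the updated array, pointwise
      have hold : ∀ s : Nat, s ≤ pre.length →
          PySem.List.pyGetD (D ++ [0]) (s : Int) 0
            = if s < pre.length then lbBal (pre.drop s) else 0 := by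
        intro s hs
        rw [PySem.List.pyGetD_natCast]
        by_cases h : s < pre.length
        · rw [if_pos h, List.getD_append _ _ _ _ (by omega), hD,
            List.getD_eq_getElem?_getD, List.getElem?_map, List.getElem?_range h]
          rfl
        · have hse : s = pre.length := by omega
          subst hse
          rw [if_neg (by omega), List.getD_eq_getElem?_getD,
            List.getElem?_append_right (by omega), hDlen]
          simp
      have hnewbal : ∀ s : Nat, s ≤ pre.length →
          lbBal ((pre ++ [v]).drop s)
            = (if s < pre.length then lbBal (pre.drop s) else 0)
              + (if lastIdx pre v + 1 ≤ (s : Int) ∧ (s : Int) < (pre.length : Int) + 1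
                 then lbOdd v else 0) := by
        intro s hs
        rw [hdrop s hs, lbBal_snoc]
        by_cases h : v ∈ pre.drop s
        · have hge : ¬ lastIdx pre v < (s : Int) :=
            fun hlt => (lastIdx_lt_iff pre v s).mp hlt h
          have hlt2 : s < pre.length := by
            by_contra hc
            rw [List.drop_eq_nil_of_le (by omega)] at h
            simp at h
          rw [if_pos h, if_pos hlt2, if_neg (by omega)]
        · have hlt : lastIdx pre v < (s : Int) := (lastIdx_lt_iff pre v s).mpr h
          have hcond : lastIdx pre v + 1 ≤ (s : Int) ∧ (s : Int) < (pre.length : Int) + 1 :=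
            ⟨by omega, by omega⟩
          rw [if_neg h, if_pos hcond]
          by_cases h2 : s < pre.length
          · rw [if_pos h2]
          · rw [if_neg h2, List.drop_eq_nil_of_le (by omega)]
            rw [show lbBal [] = 0 from rfl]
      have hD'len : ((PySem.List.pyRange (lastIdx pre v + 1) ((pre.length : Int) + 1) 1).foldl
          (lbUpd (lbOdd v)) (D ++ [0])).length = pre.length + 1 := by
        rw [lbUpd_fold_length]
        simp [hDlen]
      have hD'get : ∀ s : Nat, s ≤ pre.length →
          PySem.List.pyGetD ((PySem.List.pyRange (lastIdx pre v + 1) ((pre.length : Int) + 1) 1).foldl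
              (lbUpd (lbOdd v)) (D ++ [0])) (s : Int) 0
            = lbBal ((pre ++ [v]).drop s) := by
        intro s hs
        rw [lbUpd_fold_getD (lbOdd v) ((pre.length : Int) + 1 - (lastIdx pre v + 1)).toNat
          _ _ _ _ (by omega) le_rfl (by simp [hDlen])]
        rw [hold s hs, hnewbal s hs]
      have hD' : (PySem.List.pyRange (lastIdx pre v + 1) ((pre.length : Int) + 1) 1).foldl
            (lbUpd (lbOdd v)) (D ++ [0])
          = (List.range (pre.length + 1)).map (fun s => lbBal ((pre ++ [v]).drop s)) := by
        apply List.ext_getElem (by rw [hD'len]; simp)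
        intro i h1 h2
        have hi : i ≤ pre.length := by rw [hD'len] at h1; omega
        have := hD'get i hi
        rw [PySem.List.pyGetD_natCast, List.getD_eq_getElem _ _ h1] at this
        rw [this]
        simp [List.getElem_map, List.getElem_range]
      -- the scan equals the abstract inner fold
      have hwin : ∀ s : Nat, s ≤ pre.length →
          lbWin nums s pre.length = (pre ++ [v]).drop s := by
        intro s _
        unfold lbWin
        rw [htake]
      have hscan : lbScan ((PySem.List.pyRange (lastIdx pre v + 1) ((pre.length : Int) + 1) 1).foldl
              (lbUpd (lbOdd v)) (D ++ [0])) (pre.length : Int) ans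
              (PySem.List.pyRange 0 ((pre.length : Int) + 1) 1)
          = (PySem.List.pyRange 0 ((pre.length : Int) + 1) 1).foldl
              (fun a s => lbStepAbs nums s a (pre.length : Int)) ans := by
        rw [lbScan_eq _ _ _ _ (PySem.List.pairwise_lt_pyRange_one 0 ((pre.length : Int) + 1))]
        apply PySem.List.foldl_congr_mem
        intro a s hsm
        have hsb := PySem.List.mem_pyRange_one.mp hsm
        have hs' : s = ((s.toNat : Nat) : Int) := by omega
        have hsl : s.toNat ≤ pre.length := by omega
        rw [hs', hD'get s.toNat hsl]
        unfold lbStepAbs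
        have hgoal : lbWin nums ((((s.toNat : Nat) : Int)).toNat) ((((pre.length : Nat) : Int)).toNat)
            = (pre ++ [v]).drop s.toNat := hwin s.toNat hsl
        simp only [hgoal]
      rw [PySem.List.enumerate_cons, List.foldl_cons]
      have hstep : lbBStep (dict, D, ans) ((pre.length : Int), v)
          = (dict.insert v (pre.length : Int),
             (PySem.List.pyRange (lastIdx pre v + 1) ((pre.length : Int) + 1) 1).foldl
               (lbUpd (lbOdd v)) (D ++ [0]),
             lbScan ((PySem.List.pyRange (lastIdx pre v + 1) ((pre.length : Int) + 1) 1).foldl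
               (lbUpd (lbOdd v)) (D ++ [0])) (pre.length : Int) ans
               (PySem.List.pyRange 0 ((pre.length : Int) + 1) 1)) := by
        simp only [lbBStep, hdict]
      rw [hstep]
      have hcast : (pre.length : Int) + 1 = (((pre ++ [v]).length : Nat) : Int) := by
        simp
      rw [show PySem.List.enumerate rest ((pre.length : Int) + 1)
          = PySem.List.enumerate rest (((pre ++ [v]).length : Nat) : Int) from by rw [hcast]]
      rw [ih (pre ++ [v]) (by rw [hn]; simp)
        (dict.insert v (pre.length : Int)) _ _
        (by
          intro w
          rw [PySem.Dict.getD_insert, lastIdx_snoc]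
          by_cases h : w = v <;> simp [h, hdict])
        (by rw [hD']; simp)]
      rw [hscan]
      have hlt : (pre.length : Int) < PySem.List.len nums := by
        rw [PySem.List.len_eq]; omega
      rw [PySem.List.pyRange_one_cons hlt, List.foldl_cons, ← hcast]

theorem B_eq_absB (nums : List Int) : longestBalanced_alt nums = lbAbsB nums := by
  unfold longestBalanced_alt lbAbsB
  have := B_aux nums nums [] rfl PySem.Dict.empty [] 0
    (by intro v; rfl) (by simp)
  simpa using this

-- absA and absB are both the maximum over lbP ----------------------------

theorem stepAbs_reach (nums : List Int) (s e : Int) (hs : 0 ≤ s) (hse : s ≤ e)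
    (he : e < PySem.List.len nums) (a : Int) :
    lbStepAbs nums s a e = a ∨ lbR nums (lbStepAbs nums s a e) := by
  unfold lbStepAbs
  by_cases h : lbBal (lbWin nums s.toNat e.toNat) = 0
  · rw [if_pos h]
    rcases le_total (e - s + 1) a with h2 | h2
    · left; omega
    · right; exact ⟨s, e, ⟨hs, hse, he, h⟩, by omega⟩
  · left; rw [if_neg h]

theorem absA_ub (nums : List Int) (s e : Int) (h : lbP nums s e) :
    e - s + 1 ≤ lbAbsA nums := by
  obtain ⟨hs, hse, he, hb⟩ := h
  have hne : s ≠ e := by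
    intro heq
    subst heq
    have hsl : s.toNat < nums.length := by
      have := PySem.List.len_eq nums ▸ he; omega
    have : lbWin nums s.toNat s.toNat = [nums.getD s.toNat 0] := by
      unfold lbWin
      rw [lbWin_succ nums s.toNat s.toNat le_rfl hsl]
      rw [List.drop_eq_nil_of_le (by simp), List.nil_append]
    rw [this, lbBal_singleton] at hb
    exact lbOdd_ne_zero _ hb
  have hlt : s < e := lt_of_le_of_ne hse hne
  unfold lbAbsA
  apply foldl_ge (fun a x => foldl_keep (fun a e => lbStepAbs_mono nums x a e) _ a)
    (x := s) (PySem.List.mem_pyRange_one.mpr ⟨hs, by omega⟩)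
  intro a
  apply foldl_ge (fun a e => lbStepAbs_mono nums s a e)
    (x := e) (PySem.List.mem_pyRange_one.mpr ⟨by omega, he⟩)
  intro a2
  unfold lbStepAbs
  rw [if_pos hb]
  omega

theorem absA_reach (nums : List Int) : lbAbsA nums = 0 ∨ lbR nums (lbAbsA nums) := by
  unfold lbAbsA
  apply foldl_reach
  intro a s hsm
  have hs := PySem.List.mem_pyRange_one.mp hsm
  apply foldl_reach
  intro a2 e hem
  have he := PySem.List.mem_pyRange_one.mp hem
  exact stepAbs_reach nums s e (by omega) (by omega) (by omega) a2

theorem absB_ub (nums : List Int) (s e : Int) (h : lbP nums s e) :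
    e - s + 1 ≤ lbAbsB nums := by
  obtain ⟨hs, hse, he, hb⟩ := h
  unfold lbAbsB
  apply foldl_ge (fun a x => foldl_keep (fun a s => lbStepAbs_mono nums s a x) _ a)
    (x := e) (PySem.List.mem_pyRange_one.mpr ⟨by omega, he⟩)
  intro a
  apply foldl_ge (fun a s => lbStepAbs_mono nums s a e)
    (x := s) (PySem.List.mem_pyRange_one.mpr ⟨hs, by omega⟩)
  intro a2
  unfold lbStepAbs
  rw [if_pos hb]
  omega

theorem absB_reach (nums : List Int) : lbAbsB nums = 0 ∨ lbR nums (lbAbsB nums) := by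
  unfold lbAbsB
  apply foldl_reach
  intro a e hem
  have he := PySem.List.mem_pyRange_one.mp hem
  apply foldl_reach
  intro a2 s hsm
  have hs := PySem.List.mem_pyRange_one.mp hsm
  exact stepAbs_reach nums s e (by omega) (by omega) (by omega) a2

theorem lbAbs_eq (nums : List Int) : lbAbsA nums = lbAbsB nums := by
  rcases absA_reach nums with hA | ⟨s, e, hP, hv⟩
  · rcases absB_reach nums with hB | ⟨s, e, hP, hv⟩
    · rw [hA, hB]
    · have h1 := absA_ub nums s e hP
      have h2 : 1 ≤ e - s + 1 := by obtain ⟨_, h, _, _⟩ := hP; omega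
      omega
  · have h1 := absB_ub nums s e hP
    rcases absB_reach nums with hB | ⟨s', e', hP', hv'⟩
    · have h2 : 1 ≤ e - s + 1 := by obtain ⟨_, h, _, _⟩ := hP; omega
      omega
    · have h3 := absA_ub nums s' e' hP'
      omega

-- ===== VERDICT (by name: the statement is the Claim_ definition above) =====
theorem longestBalanced_spec : Claim_equal_longestBalanced := by
  intro nums _
  unfold Spec_longestBalanced
  rw [A_eq_absA, B_eq_absB, lbAbs_eq]
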